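-- pv_equiv track=rewrite | github.com/123jimin/ckp | ckp/graph_theory/tree/tree.py | tree_sizes_from_children
-- ===== SOURCE A (Python) =====
-- def tree_sizes_from_children(children: list[list[int]], root: int = 0) -> list[int]:
--     """ Constructs a list S, where S[i] is the size of the subtree rooted at node i. """
--     if not children: return []
--     if not children[root]:
--         assert(len(children) == 1)
--         return [1]
--
--     sizes = [0] * len(children)
--     get_sizes = sizes.__getitem__
--
--     stack = [(root, False)]
--     stack.extend((ch, True) for ch in children[root])
--
--     stack_pop, stack_push, stack_extend = stack.pop, stack.append, stack.extend
--     while stack: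
--         v, p = stack_pop()
--         if p:
--             if (lch := children[v]):
--                 stack_push((v, False))
--                 stack_extend((ch, True) for ch in lch)
--             else:
--                 sizes[v] = 1
--         else:
--             sizes[v] = 1+sum(map(get_sizes, children[v]))
--
--     return sizes
-- ===== SOURCE B (Python) =====
-- def tree_sizes_from_children(children: list[list[int]], root: int = 0) -> list[int]:
--     """ Constructs a list S, where S[i] is the size of the subtree rooted at node i. """
--     if not children: return []
--     if not children[root]:
--         assert(len(children) == 1)
--         return [1]
--
--     # pass 1: collect the visit order (each node occurrence before its children)
--     order = []
--     stack = [root]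
--     while stack:
--         v = stack.pop()
--         order.append(v)
--         stack.extend(children[v])
--
--     # pass 2: reverse sweep; every child occurrence precedes its parent occurrence
--     sizes = [0] * len(children)
--     for v in reversed(order):
--         sizes[v] = 1 + sum(sizes[c] for c in children[v])
--     return sizes
-- ===== Notes on version B (the rewrite author's own statement) =====
-- stated objective: alternative
-- what changed: A interleaves discovery and summation in one stack machine of (node, expanded?) pairs; B is two independent linear passes: a plain preorder collection pass into an order list, then a reverse sweep computing sizes[v] = 1 + sum of already-final child sizes.
import Mathlib
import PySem

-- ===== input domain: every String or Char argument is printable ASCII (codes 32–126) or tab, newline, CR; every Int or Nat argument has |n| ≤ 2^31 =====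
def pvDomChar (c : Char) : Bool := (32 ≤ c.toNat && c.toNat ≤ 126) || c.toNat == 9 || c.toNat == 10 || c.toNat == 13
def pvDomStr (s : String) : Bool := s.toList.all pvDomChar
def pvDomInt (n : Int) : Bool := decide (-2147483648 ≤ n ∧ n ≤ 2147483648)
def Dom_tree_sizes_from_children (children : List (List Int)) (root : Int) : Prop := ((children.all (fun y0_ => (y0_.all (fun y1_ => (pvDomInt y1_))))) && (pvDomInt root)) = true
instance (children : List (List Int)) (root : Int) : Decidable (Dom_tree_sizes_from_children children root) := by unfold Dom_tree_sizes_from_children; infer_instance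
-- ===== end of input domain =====

-- B replaces A's single stack machine of (node, expanded?) pairs by two independent passes:
-- a preorder collection pass into an `order` list, then a reverse sweep sizes[v] = 1 + Σ sizes[c].
-- Equal return values on all of Pre_ (neither program mutates its arguments).

-- ===== PORT A =====
-- children[x] (Python indexing, negative from the end); total form: Pre_ excludes IndexError inputs
def pvKids (children : List (List Int)) (x : Int) : List Int := PySem.List.pyGetD children x []

-- the while-loop of A; stack is top-first (Python pops/pushes at the list's end); fuel is an upper
-- bound on iterations proved sufficient under Pre_ (on fuel exhaustion the current sizes are returned)
def pvLoopA (children : List (List Int)) : Nat → List (Int × Bool) → List Int → List Int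
  | _, [], sizes => sizes
  | 0, _ :: _, sizes => sizes
  | fuel+1, (v, p) :: rest, sizes =>
    if p then
      if pvKids children v ≠ [] then
        pvLoopA children fuel
          (((pvKids children v).map (fun ch => (ch, true))).reverse ++ (v, false) :: rest) sizes
      else
        pvLoopA children fuel rest (PySem.List.pySetD sizes v 1)
    else
      pvLoopA children fuel rest
        (PySem.List.pySetD sizes v
          (1 + ((pvKids children v).map (fun c => PySem.List.pyGetD sizes c 0)).sum))

def tree_sizes_from_children (children : List (List Int)) (root : Int) : List Int :=
  if children = [] then []
  else if pvKids children root = [] then [1]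
  else
    pvLoopA children (2 * (children.flatten.length + 1) ^ (2 * children.flatten.length + 4) + 2)
      (((pvKids children root).map (fun ch => (ch, true))).reverse ++ [(root, false)])
      (List.replicate children.length 0)

-- ===== PORT B =====
-- pass 1 of B: pop a node, append it to `order`, push its children (top-first stack)
def pvLoopOrder (children : List (List Int)) : Nat → List Int → List Int → List Int
  | _, [], order => order
  | 0, _ :: _, order => order
  | fuel+1, v :: rest, order =>
    pvLoopOrder children fuel ((pvKids children v).reverse ++ rest) (order ++ [v])

-- one step of B's reverse sweep: sizes[v] = 1 + sum(sizes[c] for c in children[v])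
def pvStep (children : List (List Int)) (sizes : List Int) (v : Int) : List Int :=
  PySem.List.pySetD sizes v
    (1 + ((pvKids children v).map (fun c => PySem.List.pyGetD sizes c 0)).sum)

def tree_sizes_from_children_alt (children : List (List Int)) (root : Int) : List Int :=
  if children = [] then []
  else if pvKids children root = [] then [1]
  else
    ((pvLoopOrder children ((children.flatten.length + 1) ^ (2 * children.flatten.length + 4) + 1)
        [root] []).reverse).foldl (pvStep children) (List.replicate children.length 0)

-- ===== PRECONDITION & SPEC =====
-- effective (normalized) index of Python index i into a list of length n
def pvNorm (n : Nat) (i : Int) : Nat := (if i < 0 then i + n else i).toNat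
-- i is a valid Python index for length n
abbrev pvValidI (n : Nat) (i : Int) : Prop := -(n : Int) ≤ i ∧ i < (n : Int)
-- normalized child indices of node v
def pvNbrs (children : List (List Int)) (v : Nat) : List Nat :=
  (children.getD v []).map (pvNorm children.length)
-- one round of closing a node set under the child relation
def pvExpand (children : List (List Int)) (S : Finset Nat) : Finset Nat :=
  S ∪ S.biUnion (fun v => (pvNbrs children v).toFinset)
-- enough closing rounds to reach the fixpoint
def pvK (children : List (List Int)) : Nat := 2 * children.flatten.length + 2
-- strict descendants of v
def pvDesc (children : List (List Int)) (v : Nat) : Finset Nat :=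
  (pvExpand children)^[pvK children] (pvNbrs children v).toFinset
-- nodes reachable from the root
def pvReach (children : List (List Int)) (root : Int) : Finset Nat :=
  (pvExpand children)^[pvK children] {pvNorm children.length root}

-- Pre_ = exactly the inputs where A returns: either no nodes at all, or a valid root whose
-- childless case has exactly one node (else AssertionError), every reachable node's child entry a
-- valid index (else IndexError), and no reachable node its own descendant (else the loop diverges).
def Pre_tree_sizes_from_children (children : List (List Int)) (root : Int) : Prop :=
  children = [] ∨
  (pvValidI children.length root ∧
   (children.getD (pvNorm children.length root) [] = [] → children.length = 1) ∧
   (∀ v ∈ pvReach children root, ∀ c ∈ children.getD v [], pvValidI children.length c) ∧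
   (∀ v ∈ pvReach children root, v ∉ pvDesc children v))

instance (children : List (List Int)) (root : Int) : Decidable (Pre_tree_sizes_from_children children root) := by
  unfold Pre_tree_sizes_from_children; infer_instance

def pvWitness_tree_sizes_from_children : List (List Int) × Int := ([[1, 2], [], []], 0)

def Spec_tree_sizes_from_children (children : List (List Int)) (root : Int) (out : List Int) : Prop :=
  out = tree_sizes_from_children_alt children root
instance (children : List (List Int)) (root : Int) (out : List Int) : Decidable (Spec_tree_sizes_from_children children root out) := by
  unfold Spec_tree_sizes_from_children; infer_instance

-- ===== CLAIM (what is proved, stated in full; the proofs are below) =====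
def Claim_equal_tree_sizes_from_children : Prop := ∀ (children : List (List Int)) (root : Int), Dom_tree_sizes_from_children children root → Pre_tree_sizes_from_children children root → Spec_tree_sizes_from_children children root (tree_sizes_from_children children root)

-- ===== LEMMAS AND PROOFS =====

-- ---- closure toolkit ----
theorem pvExpand_infl (children : List (List Int)) (S : Finset Nat) : S ⊆ pvExpand children S := by
  intro x hx; exact Finset.mem_union_left _ hx

theorem pvIter_infl (children : List (List Int)) (S : Finset Nat) (k : Nat) :
    S ⊆ (pvExpand children)^[k] S := by
  induction k generalizing S with
  | zero => simp
  | succ k ih =>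
    rw [Function.iterate_succ_apply]
    exact (pvExpand_infl children S).trans (ih _)

theorem pvExpand_bound (children : List (List Int)) (S : Finset Nat) :
    pvExpand children S ⊆ S ∪ (children.flatten.map (pvNorm children.length)).toFinset := by
  intro x hx
  rcases Finset.mem_union.1 hx with h | h
  · exact Finset.mem_union_left _ h
  · rcases Finset.mem_biUnion.1 h with ⟨v, _, hxv⟩
    rw [List.mem_toFinset] at hxv
    rcases List.mem_map.1 hxv with ⟨c, hc, rfl⟩
    refine Finset.mem_union_right _ ?_
    rw [List.mem_toFinset]
    refine List.mem_map.2 ⟨c, ?_, rfl⟩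
    rcases Nat.lt_or_ge v children.length with hv | hv
    · rw [List.getD_eq_getElem _ _ hv] at hc
      exact List.mem_flatten.2 ⟨children[v], List.getElem_mem hv, hc⟩
    · rw [List.getD_eq_default _ _ hv] at hc
      cases hc

theorem pvIter_bound (children : List (List Int)) (S : Finset Nat) (k : Nat) :
    (pvExpand children)^[k] S ⊆ S ∪ (children.flatten.map (pvNorm children.length)).toFinset := by
  induction k with
  | zero => simp
  | succ k ih =>
    rw [Function.iterate_succ_apply']
    exact (pvExpand_bound children _).trans (Finset.union_subset
      (ih.trans (Finset.Subset.refl _)) (Finset.subset_union_right))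

theorem pvIter_grow (children : List (List Int)) (S : Finset Nat) (k : Nat)
    (h : ∀ j < k, (pvExpand children)^[j+1] S ≠ (pvExpand children)^[j] S) :
    S.card + k ≤ ((pvExpand children)^[k] S).card := by
  induction k with
  | zero => simp
  | succ k ih =>
    have h1 : S.card + k ≤ ((pvExpand children)^[k] S).card :=
      ih (fun j hj => h j (Nat.lt_succ_of_lt hj))
    have h2 : (pvExpand children)^[k] S ⊂ (pvExpand children)^[k+1] S := by
      rw [Function.iterate_succ_apply']
      refine Finset.ssubset_iff_subset_ne.2 ⟨pvExpand_infl children _, ?_⟩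
      intro heq
      exact h k (Nat.lt_succ_self k)
        (by rw [Function.iterate_succ_apply']; exact heq.symm)
    have := Finset.card_lt_card h2
    omega

theorem pvIter_fix (children : List (List Int)) (S : Finset Nat) :
    pvExpand children ((pvExpand children)^[pvK children] S) = (pvExpand children)^[pvK children] S := by
  have hW : ((children.flatten.map (pvNorm children.length)).toFinset).card
      ≤ children.flatten.length := by
    exact (List.toFinset_card_le _).trans (by rw [List.length_map])
  have hfix : ∃ j < pvK children,
      (pvExpand children)^[j+1] S = (pvExpand children)^[j] S := by
    by_contra hcon
    push Not at hcon
    have hg := pvIter_grow children S (pvK children) hcon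
    have hb := pvIter_bound children S (pvK children)
    have hc := Finset.card_le_card hb
    have hu := Finset.card_union_le S ((children.flatten.map (pvNorm children.length)).toFinset)
    unfold pvK at hg hc
    omega
  rcases hfix with ⟨j, hj, hfx⟩
  have hfp : pvExpand children ((pvExpand children)^[j] S) = (pvExpand children)^[j] S :=
    (Function.iterate_succ_apply' (pvExpand children) j S).symm.trans hfx
  have hKj : (pvExpand children)^[pvK children] S = (pvExpand children)^[j] S := by
    obtain ⟨d, hd⟩ : ∃ d, pvK children = d + j := ⟨pvK children - j, by omega⟩
    rw [hd, Function.iterate_add_apply, Function.iterate_fixed hfp]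
  rw [hKj, hfp]

theorem pvClosure_closed (children : List (List Int)) (S : Finset Nat) (v : Nat)
    (hv : v ∈ (pvExpand children)^[pvK children] S) :
    ∀ c ∈ pvNbrs children v, c ∈ (pvExpand children)^[pvK children] S := by
  intro c hc
  have hfix := pvIter_fix children S
  rw [← hfix]
  exact Finset.mem_union_right _ (Finset.mem_biUnion.2 ⟨v, hv, List.mem_toFinset.2 hc⟩)

theorem pvClosure_min (children : List (List Int)) (S T : Finset Nat)
    (hS : S ⊆ T) (hT : ∀ v ∈ T, ∀ c ∈ pvNbrs children v, c ∈ T) :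
    (pvExpand children)^[pvK children] S ⊆ T := by
  have : ∀ k, (pvExpand children)^[k] S ⊆ T := by
    intro k
    induction k with
    | zero => simpa using hS
    | succ k ih =>
      rw [Function.iterate_succ_apply']
      intro x hx
      rcases Finset.mem_union.1 hx with h | h
      · exact ih h
      · rcases Finset.mem_biUnion.1 h with ⟨v, hv, hxv⟩
        exact hT v (ih hv) x (List.mem_toFinset.1 hxv)
  exact this _

theorem pvNbrs_sub_desc (children : List (List Int)) (v : Nat) :
    ∀ c ∈ pvNbrs children v, c ∈ pvDesc children v := by
  intro c hc
  exact pvIter_infl children _ _ (List.mem_toFinset.2 hc)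

theorem pvDesc_trans (children : List (List Int)) (v c : Nat) (hc : c ∈ pvDesc children v) :
    pvDesc children c ⊆ pvDesc children v := by
  refine pvClosure_min children _ _ ?_ ?_
  · intro u hu
    exact pvClosure_closed children _ c hc u (List.mem_toFinset.1 hu)
  · intro u hu
    exact pvClosure_closed children _ u hu

theorem pvDesc_eq (children : List (List Int)) (v : Nat) :
    pvDesc children v =
      (pvNbrs children v).toFinset ∪ (pvNbrs children v).toFinset.biUnion (pvDesc children) := by
  apply Finset.Subset.antisymm
  · refine pvClosure_min children _ _ Finset.subset_union_left ?_
    intro u hu c hc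
    rcases Finset.mem_union.1 hu with h | h
    · exact Finset.mem_union_right _ (Finset.mem_biUnion.2
        ⟨u, h, pvNbrs_sub_desc children u c hc⟩)
    · rcases Finset.mem_biUnion.1 h with ⟨w, hw, huw⟩
      exact Finset.mem_union_right _ (Finset.mem_biUnion.2
        ⟨w, hw, pvClosure_closed children _ u huw c hc⟩)
  · refine Finset.union_subset ?_ ?_
    · intro c hc
      exact pvNbrs_sub_desc children v c (List.mem_toFinset.1 hc)
    · refine Finset.biUnion_subset.2 ?_
      intro c hc
      exact pvDesc_trans children v c (pvNbrs_sub_desc children v c (List.mem_toFinset.1 hc))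

theorem pvDesc_empty (children : List (List Int)) (v : Nat) (h : children.getD v [] = []) :
    pvDesc children v = ∅ := by
  have hn : pvNbrs children v = [] := by unfold pvNbrs; rw [h]; rfl
  unfold pvDesc
  rw [hn]
  have hfix : pvExpand children ∅ = ∅ := by
    unfold pvExpand; simp
  simp [Function.iterate_fixed hfix]

theorem pvRoot_mem_reach (children : List (List Int)) (root : Int) :
    pvNorm children.length root ∈ pvReach children root := by
  exact pvIter_infl children _ _ (Finset.mem_singleton_self _)

theorem pvReach_closed (children : List (List Int)) (root : Int) (v : Nat)
    (hv : v ∈ pvReach children root) : ∀ c ∈ pvNbrs children v, c ∈ pvReach children root := by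
  exact pvClosure_closed children _ v hv

theorem pvReach_eq (children : List (List Int)) (root : Int) :
    pvReach children root =
      insert (pvNorm children.length root) (pvDesc children (pvNorm children.length root)) := by
  apply Finset.Subset.antisymm
  · refine pvClosure_min children _ _ ?_ ?_
    · intro x hx
      rw [Finset.mem_singleton] at hx
      exact hx ▸ Finset.mem_insert_self _ _
    · intro v hv c hc
      rcases Finset.mem_insert.1 hv with h | hv
      · exact Finset.mem_insert_of_mem (by rw [← h]; exact pvNbrs_sub_desc children v c hc)
      · exact Finset.mem_insert_of_mem (pvClosure_closed children _ v hv c hc)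
  · refine Finset.insert_subset (pvRoot_mem_reach children root) ?_
    refine pvClosure_min children _ _ ?_ ?_
    · intro c hc
      exact pvReach_closed children root _ (pvRoot_mem_reach children root) c
        (List.mem_toFinset.1 hc)
    · intro v hv c hc
      exact pvReach_closed children root v hv c hc

-- ---- measure, preorder unfolding, sizes ----
def pvM (children : List (List Int)) (v : Nat) : Nat := (pvDesc children v).card

def pvPreF (children : List (List Int)) : Nat → Nat → List Nat
  | 0, _ => []
  | f+1, v => v :: ((pvNbrs children v).reverse.flatMap (pvPreF children f))

def pvPre (children : List (List Int)) (v : Nat) : List Nat :=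
  pvPreF children (pvM children v + 1) v

def pvS (children : List (List Int)) (v : Nat) : Int := ((pvPre children v).length : Int)

def pvMk (children : List (List Int)) (D : Finset Nat) : List Int :=
  (List.range children.length).map (fun i => if i ∈ D then pvS children i else 0)

theorem pvM_lt (children : List (List Int)) (root : Int)
    (hacyc : ∀ v ∈ pvReach children root, v ∉ pvDesc children v)
    (v c : Nat) (hv : v ∈ pvReach children root) (hc : c ∈ pvNbrs children v) :
    pvM children c < pvM children v := by
  have hcv : c ∈ pvDesc children v := pvNbrs_sub_desc children v c hc
  have hcr : c ∈ pvReach children root := pvReach_closed children root v hv c hc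
  have hsub : pvDesc children c ⊂ pvDesc children v := by
    refine ⟨pvDesc_trans children v c hcv, ?_⟩
    intro hsub
    exact hacyc c hcr (hsub hcv)
  exact Finset.card_lt_card hsub

theorem pvKids_len_le (children : List (List Int)) (v : Nat) :
    (children.getD v []).length ≤ children.flatten.length := by
  rcases Nat.lt_or_ge v children.length with hv | hv
  · rw [List.getD_eq_getElem _ _ hv]
    rw [List.length_flatten]
    exact List.le_sum_of_mem (List.mem_map.2 ⟨children[v], List.getElem_mem hv, rfl⟩)
  · rw [List.getD_eq_default _ _ hv]; simp

theorem pvM_le (children : List (List Int)) (v : Nat) :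
    pvM children v ≤ 2 * children.flatten.length := by
  have hb := pvIter_bound children (pvNbrs children v).toFinset (pvK children)
  have h1 : (pvDesc children v).card ≤
      ((pvNbrs children v).toFinset ∪ (children.flatten.map (pvNorm children.length)).toFinset).card :=
    Finset.card_le_card hb
  have h2 := Finset.card_union_le (pvNbrs children v).toFinset
    ((children.flatten.map (pvNorm children.length)).toFinset)
  have h3 : ((pvNbrs children v).toFinset).card ≤ children.flatten.length := by
    refine (List.toFinset_card_le _).trans ?_
    unfold pvNbrs
    rw [List.length_map]
    exact pvKids_len_le children v
  have h4 : ((children.flatten.map (pvNorm children.length)).toFinset).card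
      ≤ children.flatten.length :=
    (List.toFinset_card_le _).trans (by rw [List.length_map])
  unfold pvM
  omega

theorem pvPreF_stable (children : List (List Int)) (root : Int)
    (hacyc : ∀ v ∈ pvReach children root, v ∉ pvDesc children v)
    (v : Nat) (hv : v ∈ pvReach children root) :
    ∀ f g : Nat, pvM children v < f → pvM children v < g →
      pvPreF children f v = pvPreF children g v := by
  have key : ∀ M : Nat, ∀ v : Nat, pvM children v < M → v ∈ pvReach children root →
      ∀ f g : Nat, pvM children v < f → pvM children v < g →
        pvPreF children f v = pvPreF children g v := by
    intro M
    induction M with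
    | zero => intro v h; omega
    | succ M ih =>
      intro v hvM hv f g hf hg
      cases f with
      | zero => omega
      | succ f =>
        cases g with
        | zero => omega
        | succ g =>
          simp only [pvPreF]
          congr 1
          refine List.flatMap_congr ?_
          intro c hc
          rw [List.mem_reverse] at hc
          have hlt := pvM_lt children root hacyc v c hv hc
          have hcr := pvReach_closed children root v hv c hc
          exact ih c (by omega) hcr f g (by omega) (by omega)
  exact fun f g hf hg => key (pvM children v + 1) v (by omega) hv f g hf hg

theorem pvPre_unfold (children : List (List Int)) (root : Int)
    (hacyc : ∀ v ∈ pvReach children root, v ∉ pvDesc children v)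
    (v : Nat) (hv : v ∈ pvReach children root) :
    pvPre children v = v :: ((pvNbrs children v).reverse.flatMap (pvPre children)) := by
  have h0 : pvPre children v = pvPreF children (pvM children v + 1) v := rfl
  rw [h0]
  simp only [pvPreF]
  congr 1
  refine List.flatMap_congr ?_
  intro c hc
  rw [List.mem_reverse] at hc
  have hlt := pvM_lt children root hacyc v c hv hc
  have hcr := pvReach_closed children root v hv c hc
  exact pvPreF_stable children root hacyc c hcr (pvM children v) (pvM children c + 1)
    (by omega) (by omega)

theorem pvPre_len_pos (children : List (List Int)) (v : Nat) : 1 ≤ (pvPre children v).length := by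
  unfold pvPre pvPreF
  simp

theorem pvS_unfold (children : List (List Int)) (root : Int)
    (hacyc : ∀ v ∈ pvReach children root, v ∉ pvDesc children v)
    (v : Nat) (hv : v ∈ pvReach children root) :
    pvS children v = 1 + ((pvNbrs children v).map (pvS children)).sum := by
  unfold pvS
  rw [pvPre_unfold children root hacyc v hv]
  simp only [List.length_cons, List.length_flatMap, List.map_reverse, List.sum_reverse]
  push_cast
  simp only [List.map_map, Function.comp_def]
  omega

theorem pvS_leaf (children : List (List Int)) (v : Nat) (h : children.getD v [] = []) :
    pvS children v = 1 := by
  have hn : pvNbrs children v = [] := by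
    unfold pvNbrs; rw [h]; rfl
  unfold pvS pvPre
  simp [pvPreF, hn]

theorem pvPre_len_bnd (children : List (List Int)) (root : Int)
    (hacyc : ∀ v ∈ pvReach children root, v ∉ pvDesc children v)
    (v : Nat) (hv : v ∈ pvReach children root) :
    (pvPre children v).length ≤ (children.flatten.length + 1) ^ (2 * children.flatten.length + 1) := by
  have key : ∀ M : Nat, ∀ v : Nat, pvM children v < M → v ∈ pvReach children root →
      (pvPre children v).length ≤ (children.flatten.length + 1) ^ (pvM children v + 1) := by
    intro M
    induction M with
    | zero => intro v h; omega
    | succ M ih =>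
      intro v hvM hv
      rw [pvPre_unfold children root hacyc v hv]
      simp only [List.length_cons, List.length_flatMap, List.map_reverse, List.sum_reverse]
      have hbnd : ∀ x ∈ (pvNbrs children v).map (fun c => (pvPre children c).length),
          x ≤ (children.flatten.length + 1) ^ (pvM children v) := by
        intro x hx
        rcases List.mem_map.1 hx with ⟨c, hc, rfl⟩
        have hlt := pvM_lt children root hacyc v c hv hc
        have hcr := pvReach_closed children root v hv c hc
        refine (ih c (by omega) hcr).trans ?_
        exact Nat.pow_le_pow_right (by omega) (by omega)
      have hsum := List.sum_le_card_nsmul _ _ hbnd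
      rw [smul_eq_mul, List.length_map] at hsum
      have hlen : (pvNbrs children v).length ≤ children.flatten.length := by
        unfold pvNbrs; rw [List.length_map]; exact pvKids_len_le children v
      have hP : 1 ≤ (children.flatten.length + 1) ^ (pvM children v) :=
        Nat.one_le_pow _ _ (by omega)
      have hstep : (children.flatten.length + 1) ^ (pvM children v + 1)
          = children.flatten.length * (children.flatten.length + 1) ^ (pvM children v)
            + (children.flatten.length + 1) ^ (pvM children v) := by
        rw [pow_succ]; ring
      have hmul : (pvNbrs children v).length * (children.flatten.length + 1) ^ (pvM children v)
          ≤ children.flatten.length * (children.flatten.length + 1) ^ (pvM children v) :=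
        Nat.mul_le_mul_right _ hlen
      omega
  have h1 := key (pvM children v + 1) v (by omega) hv
  refine h1.trans ?_
  refine Nat.pow_le_pow_right (by omega) ?_
  have := pvM_le children v
  omega

-- ---- Python-indexing bridges ----
theorem pvNorm_lt (n : Nat) (i : Int) (h : pvValidI n i) : pvNorm n i < n := by
  unfold pvNorm
  rcases h with ⟨h1, h2⟩
  split_ifs <;> omega

theorem pvGetD_valid {α : Type} (xs : List α) (d : α) (i : Int) (h : pvValidI xs.length i) :
    PySem.List.pyGetD xs i d = xs.getD (pvNorm xs.length i) d := by
  rcases h with ⟨h1, h2⟩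
  unfold pvNorm
  by_cases hi : i < 0
  · have hidx : xs.length - (-i).toNat = (i + (xs.length : Int)).toNat := by omega
    simp only [PySem.List.pyGetD, PySem.List.pyGet?, PySem.List.pyIdx?,
      if_neg (by omega : ¬ 0 ≤ i), if_pos h1, if_pos hi, hidx, Option.bind_some,
      List.getD_eq_getElem?_getD]
  · have hi' : 0 ≤ i := by omega
    simp only [PySem.List.pyGetD, PySem.List.pyGet?, PySem.List.pyIdx?, if_pos hi', if_pos h2,
      if_neg hi, Option.bind_some, List.getD_eq_getElem?_getD]

theorem pvSetD_valid {α : Type} (xs : List α) (v : α) (i : Int) (h : pvValidI xs.length i) :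
    PySem.List.pySetD xs i v = xs.set (pvNorm xs.length i) v := by
  rcases h with ⟨h1, h2⟩
  unfold pvNorm
  by_cases hi : i < 0
  · have hidx : xs.length - (-i).toNat = (i + (xs.length : Int)).toNat := by omega
    simp only [PySem.List.pySetD, PySem.List.pySet?, PySem.List.pyIdx?,
      if_neg (by omega : ¬ 0 ≤ i), if_pos h1, if_pos hi, hidx, Option.map_some, Option.getD_some]
  · have hi' : 0 ≤ i := by omega
    simp only [PySem.List.pySetD, PySem.List.pySet?, PySem.List.pyIdx?, if_pos hi', if_pos h2,
      if_neg hi, Option.map_some, Option.getD_some]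

theorem pvKids_eq (children : List (List Int)) (x : Int) (h : pvValidI children.length x) :
    pvKids children x = children.getD (pvNorm children.length x) [] := by
  unfold pvKids
  exact pvGetD_valid children [] x h

theorem pvMk_len (children : List (List Int)) (D : Finset Nat) :
    (pvMk children D).length = children.length := by
  unfold pvMk
  rw [List.length_map, List.length_range]

theorem pvMk_empty (children : List (List Int)) :
    List.replicate children.length (0 : Int) = pvMk children ∅ := by
  unfold pvMk
  apply List.ext_getElem
  · simp
  · intro i h1 h2
    simp

theorem pvMk_getD (children : List (List Int)) (D : Finset Nat) (i : Nat) (h : i < children.length) :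
    (pvMk children D).getD i 0 = if i ∈ D then pvS children i else 0 := by
  unfold pvMk
  rw [List.getD_eq_getElem _ _ (by simpa using h)]
  simp

theorem pvMk_set (children : List (List Int)) (D : Finset Nat) (i : Nat) (h : i < children.length) :
    (pvMk children D).set i (pvS children i) = pvMk children (insert i D) := by
  unfold pvMk
  apply List.ext_getElem
  · simp
  · intro j h1 h2
    rw [List.getElem_set (by simpa using h1)]
    simp only [List.getElem_map, List.getElem_range]
    by_cases hij : i = j
    · subst hij
      simp
    · rw [if_neg hij]
      simp only [Finset.mem_insert]
      have : ¬ (j = i) := fun hh => hij hh.symm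
      simp [this]

theorem pvInsertU (children : List (List Int)) (D : Finset Nat) (v : Nat) :
    insert v (D ∪ (pvNbrs children v).toFinset.biUnion (fun u => insert u (pvDesc children u)))
      = D ∪ insert v (pvDesc children v) := by
  ext u
  have hd : u ∈ pvDesc children v ↔ u ∈ (pvNbrs children v).toFinset ∪
      (pvNbrs children v).toFinset.biUnion (pvDesc children) := by
    rw [← pvDesc_eq children v]
  simp only [Finset.mem_insert, Finset.mem_union, Finset.mem_biUnion, List.mem_toFinset] at hd ⊢
  constructor
  · rintro (rfl | h | ⟨a, ha, rfl | h⟩)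
    · right; left; rfl
    · left; exact h
    · right; right; exact hd.2 (Or.inl ha)
    · right; right; exact hd.2 (Or.inr ⟨a, ha, h⟩)
  · rintro (h | rfl | h)
    · right; left; exact h
    · left; rfl
    · rcases hd.1 h with hn | ⟨a, ha, hu⟩
      · exact Or.inr (Or.inr ⟨u, hn, Or.inl rfl⟩)
      · exact Or.inr (Or.inr ⟨a, ha, Or.inr hu⟩)

-- shared step: setting node x when all its children are already final
theorem pvStep_mk (children : List (List Int)) (root : Int) (D : Finset Nat)
    (hacyc : ∀ v ∈ pvReach children root, v ∉ pvDesc children v)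
    (hval : ∀ v ∈ pvReach children root, ∀ c ∈ children.getD v [], pvValidI children.length c)
    (x : Int) (hx : pvValidI children.length x)
    (hxr : pvNorm children.length x ∈ pvReach children root)
    (hD : ∀ c ∈ children.getD (pvNorm children.length x) [], pvNorm children.length c ∈ D) :
    pvStep children (pvMk children D) x = pvMk children (insert (pvNorm children.length x) D) := by
  have hlen : (pvMk children D).length = children.length := pvMk_len children D
  have hx' : pvValidI (pvMk children D).length x := by rw [hlen]; exact hx
  unfold pvStep
  rw [pvSetD_valid (pvMk children D) _ x hx', pvKids_eq children x hx, hlen]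
  have hmap : ∀ c ∈ children.getD (pvNorm children.length x) [],
      (fun c => PySem.List.pyGetD (pvMk children D) c 0) c
        = (fun c => pvS children (pvNorm children.length c)) c := by
    intro c hc
    have hcv : pvValidI children.length c := hval _ hxr c hc
    have hcv' : pvValidI (pvMk children D).length c := by rw [hlen]; exact hcv
    simp only
    rw [pvGetD_valid (pvMk children D) 0 c hcv', hlen,
      pvMk_getD children D _ (pvNorm_lt _ _ hcv), if_pos (hD c hc)]
  rw [List.map_congr_left hmap]
  have hm2 : (children.getD (pvNorm children.length x) []).map
      (fun c => pvS children (pvNorm children.length c))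
      = (pvNbrs children (pvNorm children.length x)).map (pvS children) := by
    unfold pvNbrs; rw [List.map_map]; rfl
  rw [hm2, ← pvS_unfold children root hacyc _ hxr,
    pvMk_set children D _ (pvNorm_lt _ _ hx)]

-- ---- the A machine ----
def pvCost (children : List (List Int)) : List (Int × Bool) → Nat
  | [] => 0
  | (x, true) :: r => 2 * (pvPre children (pvNorm children.length x)).length + pvCost children r
  | (_, false) :: r => 1 + pvCost children r

def pvFinD (children : List (List Int)) : List (Int × Bool) → Finset Nat → Finset Nat
  | [], D => D
  | (x, true) :: r, D =>
      pvFinD children r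
        (D ∪ insert (pvNorm children.length x) (pvDesc children (pvNorm children.length x)))
  | (x, false) :: r, D => pvFinD children r (insert (pvNorm children.length x) D)

def pvSOK (children : List (List Int)) (root : Int) : List (Int × Bool) → Finset Nat → Prop
  | [], _ => True
  | (x, true) :: r, D =>
      pvValidI children.length x ∧ pvNorm children.length x ∈ pvReach children root ∧
      pvSOK children root r
        (D ∪ insert (pvNorm children.length x) (pvDesc children (pvNorm children.length x)))
  | (x, false) :: r, D =>
      pvValidI children.length x ∧ pvNorm children.length x ∈ pvReach children root ∧
      (∀ c ∈ children.getD (pvNorm children.length x) [], pvNorm children.length c ∈ D) ∧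
      pvSOK children root r (insert (pvNorm children.length x) D)

theorem pvCost_append (children : List (List Int)) (s t : List (Int × Bool)) :
    pvCost children (s ++ t) = pvCost children s + pvCost children t := by
  induction s with
  | nil => simp [pvCost]
  | cons e r ih =>
    rcases e with ⟨x, b⟩
    cases b <;> simp [pvCost, ih] <;> omega

theorem pvCost_trueRev (children : List (List Int)) (cs : List Int) :
    pvCost children ((cs.map (fun ch => (ch, true))).reverse)
      = 2 * ((cs.map (fun c => (pvPre children (pvNorm children.length c)).length)).sum) := by
  induction cs with
  | nil => simp [pvCost]
  | cons c cs ih =>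
    rw [List.map_cons, List.reverse_cons, pvCost_append, ih]
    simp only [pvCost, List.map_cons, List.sum_cons]
    omega

theorem pvFinD_append (children : List (List Int)) (s t : List (Int × Bool)) (D : Finset Nat) :
    pvFinD children (s ++ t) D = pvFinD children t (pvFinD children s D) := by
  induction s generalizing D with
  | nil => simp [pvFinD]
  | cons e r ih =>
    rcases e with ⟨x, b⟩
    cases b <;> simp [pvFinD, ih]

theorem pvFinD_trueRev (children : List (List Int)) (cs : List Int) (D : Finset Nat) :
    pvFinD children ((cs.map (fun ch => (ch, true))).reverse) D
      = D ∪ (cs.map (pvNorm children.length)).toFinset.biUnion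
              (fun u => insert u (pvDesc children u)) := by
  induction cs generalizing D with
  | nil => simp [pvFinD]
  | cons c cs ih =>
    rw [List.map_cons, List.reverse_cons, pvFinD_append, ih]
    simp only [pvFinD]
    ext u
    simp only [Finset.mem_union, Finset.mem_biUnion, List.mem_toFinset, List.map_cons,
      List.mem_cons, Finset.mem_insert]
    constructor
    · rintro ((h | ⟨a, ha, hu⟩) | h | h)
      · exact Or.inl h
      · exact Or.inr ⟨a, Or.inr ha, hu⟩
      · exact Or.inr ⟨pvNorm children.length c, Or.inl rfl, Or.inl h⟩
      · exact Or.inr ⟨pvNorm children.length c, Or.inl rfl, Or.inr h⟩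
    · rintro (h | ⟨a, rfl | ha, hu⟩)
      · exact Or.inl (Or.inl h)
      · rcases hu with h | h
        · exact Or.inr (Or.inl h)
        · exact Or.inr (Or.inr h)
      · exact Or.inl (Or.inr ⟨a, ha, hu⟩)

theorem pvSOK_trueRev (children : List (List Int)) (root : Int) (cs : List Int)
    (hcs : ∀ c ∈ cs, pvValidI children.length c ∧ pvNorm children.length c ∈ pvReach children root)
    (rest : List (Int × Bool)) (D : Finset Nat)
    (hrest : pvSOK children root rest
      (pvFinD children ((cs.map (fun ch => (ch, true))).reverse) D)) :
    pvSOK children root ((cs.map (fun ch => (ch, true))).reverse ++ rest) D := by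
  have gen : ∀ cs' : List Int,
      (∀ c ∈ cs', pvValidI children.length c ∧
        pvNorm children.length c ∈ pvReach children root) →
      ∀ (rest : List (Int × Bool)) (D : Finset Nat),
        pvSOK children root rest
          (pvFinD children ((cs'.map (fun ch => (ch, true))).reverse) D) →
        pvSOK children root ((cs'.map (fun ch => (ch, true))).reverse ++ rest) D := by
    intro cs'
    induction cs' with
    | nil => intro _ rest D h; simpa [pvFinD] using h
    | cons c cs ih =>
      intro hcs' rest D hrest
      have heq : pvFinD children ((List.map (fun ch => (ch, true)) (c :: cs)).reverse) D
          = pvFinD children ((List.map (fun ch => (ch, true)) cs).reverse) D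
            ∪ insert (pvNorm children.length c) (pvDesc children (pvNorm children.length c)) := by
        rw [List.map_cons, List.reverse_cons, pvFinD_append]
        simp [pvFinD]
      rw [heq] at hrest
      rw [List.map_cons, List.reverse_cons, List.append_assoc]
      refine ih (fun a ha => hcs' a (List.mem_cons_of_mem _ ha)) ((c, true) :: rest) D ?_
      exact ⟨(hcs' c (List.mem_cons_self)).1, (hcs' c (List.mem_cons_self)).2, hrest⟩
  exact gen cs hcs rest D hrest

theorem pvLoopA_run (children : List (List Int)) (root : Int)
    (hacyc : ∀ v ∈ pvReach children root, v ∉ pvDesc children v)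
    (hval : ∀ v ∈ pvReach children root, ∀ c ∈ children.getD v [], pvValidI children.length c) :
    ∀ (fuel : Nat) (stack : List (Int × Bool)) (D : Finset Nat),
      pvSOK children root stack D → pvCost children stack ≤ fuel →
      pvLoopA children fuel stack (pvMk children D) = pvMk children (pvFinD children stack D) := by
  intro fuel
  induction fuel with
  | zero =>
    intro stack D hsok hcost
    cases stack with
    | nil => simp [pvLoopA, pvFinD]
    | cons e r =>
      exfalso
      rcases e with ⟨x, b⟩
      have hp := pvPre_len_pos children (pvNorm children.length x)
      cases b <;> simp only [pvCost] at hcost <;> omega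
  | succ fuel ih =>
    intro stack D hsok hcost
    cases stack with
    | nil => simp [pvLoopA, pvFinD]
    | cons e r =>
      rcases e with ⟨x, b⟩
      cases b with
      | true =>
        rcases hsok with ⟨hxv, hxr, hsok'⟩
        have hkeq := pvKids_eq children x hxv
        simp only [pvLoopA]
        rw [if_pos trivial]
        split_ifs with hcond
        · -- node with children: expand
          have hcs : ∀ c ∈ pvKids children x, pvValidI children.length c ∧
              pvNorm children.length c ∈ pvReach children root := by
            intro c hc
            rw [hkeq] at hc
            refine ⟨hval _ hxr c hc, pvReach_closed children root _ hxr _ ?_⟩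
            exact List.mem_map.2 ⟨c, hc, rfl⟩
          have hnbrs_eq : ((pvKids children x).map (pvNorm children.length)).toFinset
              = (pvNbrs children (pvNorm children.length x)).toFinset := by
            rw [hkeq]; rfl
          have hU := pvInsertU children D (pvNorm children.length x)
          have hUeq : insert (pvNorm children.length x)
              (D ∪ ((pvKids children x).map (pvNorm children.length)).toFinset.biUnion
                (fun u => insert u (pvDesc children u)))
              = D ∪ insert (pvNorm children.length x)
                  (pvDesc children (pvNorm children.length x)) := by
            rw [hnbrs_eq]; exact hU
          have hsok2 : pvSOK children root
              (((pvKids children x).map (fun ch => (ch, true))).reverse ++ (x, false) :: r) D := by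
            refine pvSOK_trueRev children root _ hcs _ _ ?_
            rw [pvFinD_trueRev]
            refine ⟨hxv, hxr, ?_, ?_⟩
            · intro c hc
              refine Finset.mem_union_right _ (Finset.mem_biUnion.2
                ⟨pvNorm children.length c, ?_, Finset.mem_insert_self _ _⟩)
              rw [List.mem_toFinset, hkeq]
              exact List.mem_map.2 ⟨c, hc, rfl⟩
            · show pvSOK children root r _
              rw [hUeq]
              exact hsok'
          have hlenpre : (pvPre children (pvNorm children.length x)).length
              = 1 + ((pvKids children x).map
                  (fun c => (pvPre children (pvNorm children.length c)).length)).sum := by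
            rw [pvPre_unfold children root hacyc _ hxr]
            simp only [List.length_cons, List.length_flatMap, List.map_reverse, List.sum_reverse]
            rw [hkeq]
            unfold pvNbrs
            rw [List.map_map]
            simp only [Function.comp_def]
            omega
          have hcost2 : pvCost children
              (((pvKids children x).map (fun ch => (ch, true))).reverse ++ (x, false) :: r) ≤ fuel := by
            rw [pvCost_append, pvCost_trueRev]
            simp only [pvCost]
            simp only [pvCost] at hcost
            omega
          rw [ih _ D hsok2 hcost2]
          congr 1
          rw [pvFinD_append, pvFinD_trueRev]
          simp only [pvFinD]
          rw [hUeq]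
        · -- leaf
          have hk : pvKids children x = [] := by
            by_contra hk'; exact hcond hk'
          have hgetd : children.getD (pvNorm children.length x) [] = [] := by
            rw [← hkeq]; exact hk
          have h1 : (1 : Int) = pvS children (pvNorm children.length x) :=
            (pvS_leaf children _ hgetd).symm
          have hlen : (pvMk children D).length = children.length := pvMk_len children D
          have hx' : pvValidI (pvMk children D).length x := by rw [hlen]; exact hxv
          rw [pvSetD_valid (pvMk children D) _ x hx', hlen, h1,
            pvMk_set children D _ (pvNorm_lt _ _ hxv)]
          have hdesc := pvDesc_empty children _ hgetd
          have hDeq : D ∪ insert (pvNorm children.length x)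
              (pvDesc children (pvNorm children.length x))
              = insert (pvNorm children.length x) D := by
            rw [hdesc]; ext u; simp
          rw [hDeq] at hsok'
          have hcost2 : pvCost children r ≤ fuel := by
            simp only [pvCost] at hcost
            have := pvPre_len_pos children (pvNorm children.length x)
            omega
          rw [ih r _ hsok' hcost2]
          congr 1
          simp only [pvFinD]
          rw [hDeq]
      | false =>
        rcases hsok with ⟨hxv, hxr, hkD, hsok'⟩
        simp only [pvLoopA]
        rw [if_neg (by decide : ¬ (false = true))]
        have hstep : PySem.List.pySetD (pvMk children D) x
            (1 + ((pvKids children x).map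
              (fun c => PySem.List.pyGetD (pvMk children D) c 0)).sum)
            = pvStep children (pvMk children D) x := rfl
        rw [hstep, pvStep_mk children root D hacyc hval x hxv hxr hkD]
        have hcost2 : pvCost children r ≤ fuel := by
          simp only [pvCost] at hcost; omega
        rw [ih r _ hsok' hcost2]
        rfl

-- ---- the B machine ----
def pvPrawF (children : List (List Int)) : Nat → Int → List Int
  | 0, _ => []
  | f+1, x => x :: ((pvKids children x).reverse.flatMap (pvPrawF children f))

def pvPraw (children : List (List Int)) (x : Int) : List Int :=
  pvPrawF children (pvM children (pvNorm children.length x) + 1) x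

theorem pvPraw_len_pos (children : List (List Int)) (x : Int) : 1 ≤ (pvPraw children x).length := by
  unfold pvPraw pvPrawF
  simp

theorem pvPrawF_stable (children : List (List Int)) (root : Int)
    (hacyc : ∀ v ∈ pvReach children root, v ∉ pvDesc children v)
    (hval : ∀ v ∈ pvReach children root, ∀ c ∈ children.getD v [], pvValidI children.length c)
    (x : Int) (hx : pvValidI children.length x)
    (hxr : pvNorm children.length x ∈ pvReach children root) :
    ∀ f g : Nat, pvM children (pvNorm children.length x) < f →
      pvM children (pvNorm children.length x) < g →
      pvPrawF children f x = pvPrawF children g x := by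
  have key : ∀ M : Nat, ∀ x : Int, pvM children (pvNorm children.length x) < M →
      pvValidI children.length x → pvNorm children.length x ∈ pvReach children root →
      ∀ f g : Nat, pvM children (pvNorm children.length x) < f →
        pvM children (pvNorm children.length x) < g →
        pvPrawF children f x = pvPrawF children g x := by
    intro M
    induction M with
    | zero => intro x h; omega
    | succ M ih =>
      intro x hxM hxv hxr f g hf hg
      cases f with
      | zero => omega
      | succ f =>
        cases g with
        | zero => omega
        | succ g =>
          simp only [pvPrawF]
          congr 1
          refine List.flatMap_congr ?_
          intro c hc
          rw [List.mem_reverse, pvKids_eq children x hxv] at hc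
          have hcv : pvValidI children.length c := hval _ hxr c hc
          have hcnb : pvNorm children.length c ∈ pvNbrs children (pvNorm children.length x) :=
            List.mem_map.2 ⟨c, hc, rfl⟩
          have hcr := pvReach_closed children root _ hxr _ hcnb
          have hlt := pvM_lt children root hacyc _ _ hxr hcnb
          exact ih c (by omega) hcv hcr f g (by omega) (by omega)
  exact fun f g hf hg => key (pvM children (pvNorm children.length x) + 1) x (by omega) hx hxr f g hf hg

theorem pvPraw_unfold (children : List (List Int)) (root : Int)
    (hacyc : ∀ v ∈ pvReach children root, v ∉ pvDesc children v)
    (hval : ∀ v ∈ pvReach children root, ∀ c ∈ children.getD v [], pvValidI children.length c)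
    (x : Int) (hx : pvValidI children.length x)
    (hxr : pvNorm children.length x ∈ pvReach children root) :
    pvPraw children x = x :: ((pvKids children x).reverse.flatMap (pvPraw children)) := by
  have h0 : pvPraw children x
      = pvPrawF children (pvM children (pvNorm children.length x) + 1) x := rfl
  rw [h0]
  simp only [pvPrawF]
  congr 1
  refine List.flatMap_congr ?_
  intro c hc
  rw [List.mem_reverse, pvKids_eq children x hx] at hc
  have hcv : pvValidI children.length c := hval _ hxr c hc
  have hcnb : pvNorm children.length c ∈ pvNbrs children (pvNorm children.length x) :=
    List.mem_map.2 ⟨c, hc, rfl⟩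
  have hcr := pvReach_closed children root _ hxr _ hcnb
  have hlt := pvM_lt children root hacyc _ _ hxr hcnb
  exact pvPrawF_stable children root hacyc hval c hcv hcr
    (pvM children (pvNorm children.length x)) (pvM children (pvNorm children.length c) + 1)
    (by omega) (by omega)

theorem pvPraw_map_norm (children : List (List Int)) (root : Int)
    (hacyc : ∀ v ∈ pvReach children root, v ∉ pvDesc children v)
    (hval : ∀ v ∈ pvReach children root, ∀ c ∈ children.getD v [], pvValidI children.length c)
    (x : Int) (hx : pvValidI children.length x)
    (hxr : pvNorm children.length x ∈ pvReach children root) :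
    (pvPraw children x).map (pvNorm children.length) = pvPre children (pvNorm children.length x) := by
  have key : ∀ M : Nat, ∀ x : Int, pvM children (pvNorm children.length x) < M →
      pvValidI children.length x → pvNorm children.length x ∈ pvReach children root →
      (pvPraw children x).map (pvNorm children.length)
        = pvPre children (pvNorm children.length x) := by
    intro M
    induction M with
    | zero => intro x h; omega
    | succ M ih =>
      intro x hxM hxv hxr
      rw [pvPraw_unfold children root hacyc hval x hxv hxr,
        pvPre_unfold children root hacyc _ hxr]
      simp only [List.map_cons, List.map_flatMap]
      congr 1
      have hrev : (pvNbrs children (pvNorm children.length x)).reverse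
          = ((pvKids children x).reverse).map (pvNorm children.length) := by
        rw [pvKids_eq children x hxv]
        unfold pvNbrs
        rw [List.map_reverse]
      rw [hrev, List.flatMap_map]
      refine List.flatMap_congr ?_
      intro c hc
      rw [List.mem_reverse, pvKids_eq children x hxv] at hc
      have hcv : pvValidI children.length c := hval _ hxr c hc
      have hcnb : pvNorm children.length c ∈ pvNbrs children (pvNorm children.length x) :=
        List.mem_map.2 ⟨c, hc, rfl⟩
      have hcr := pvReach_closed children root _ hxr _ hcnb
      have hlt := pvM_lt children root hacyc _ _ hxr hcnb
      exact ih c (by omega) hcv hcr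
  exact key (pvM children (pvNorm children.length x) + 1) x (by omega) hx hxr

theorem pvLoopOrder_run (children : List (List Int)) (root : Int)
    (hacyc : ∀ v ∈ pvReach children root, v ∉ pvDesc children v)
    (hval : ∀ v ∈ pvReach children root, ∀ c ∈ children.getD v [], pvValidI children.length c) :
    ∀ (fuel : Nat) (stack : List Int) (order : List Int),
      (∀ x ∈ stack, pvValidI children.length x ∧ pvNorm children.length x ∈ pvReach children root) →
      ((stack.map (fun x => (pvPraw children x).length)).sum ≤ fuel) →
      pvLoopOrder children fuel stack order = order ++ stack.flatMap (pvPraw children) := by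
  intro fuel
  induction fuel with
  | zero =>
    intro stack order hst hsum
    cases stack with
    | nil => simp [pvLoopOrder]
    | cons x r =>
      exfalso
      have hp := pvPraw_len_pos children x
      simp only [List.map_cons, List.sum_cons] at hsum
      omega
  | succ fuel ih =>
    intro stack order hst hsum
    cases stack with
    | nil => simp [pvLoopOrder]
    | cons x r =>
      simp only [pvLoopOrder]
      rcases hst x (List.mem_cons_self) with ⟨hxv, hxr⟩
      have hunf := pvPraw_unfold children root hacyc hval x hxv hxr
      have hst' : ∀ y ∈ (pvKids children x).reverse ++ r,
          pvValidI children.length y ∧ pvNorm children.length y ∈ pvReach children root := by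
        intro y hy
        rcases List.mem_append.1 hy with hy | hy
        · rw [List.mem_reverse, pvKids_eq children x hxv] at hy
          refine ⟨hval _ hxr y hy, pvReach_closed children root _ hxr _
            (List.mem_map.2 ⟨y, hy, rfl⟩)⟩
        · exact hst y (List.mem_cons_of_mem _ hy)
      have hsum' : (((pvKids children x).reverse ++ r).map
          (fun y => (pvPraw children y).length)).sum ≤ fuel := by
        have hlen : (pvPraw children x).length
            = 1 + (((pvKids children x).reverse).map
                (fun y => (pvPraw children y).length)).sum := by
          rw [hunf]
          simp only [List.length_cons, List.length_flatMap]
          omega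
        simp only [List.map_cons, List.sum_cons] at hsum
        rw [List.map_append, List.sum_append]
        omega
      rw [ih _ _ hst' hsum']
      rw [List.flatMap_cons, hunf, List.flatMap_append]
      simp [List.append_assoc]

theorem pvSweep_run (children : List (List Int)) (root : Int)
    (hacyc : ∀ v ∈ pvReach children root, v ∉ pvDesc children v)
    (hval : ∀ v ∈ pvReach children root, ∀ c ∈ children.getD v [], pvValidI children.length c) :
    ∀ (x : Int), pvValidI children.length x →
      pvNorm children.length x ∈ pvReach children root →
      ∀ D : Finset Nat,
        ((pvPraw children x).reverse).foldl (pvStep children) (pvMk children D)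
          = pvMk children
              (D ∪ insert (pvNorm children.length x) (pvDesc children (pvNorm children.length x))) := by
  have key : ∀ M : Nat, ∀ x : Int, pvM children (pvNorm children.length x) < M →
      pvValidI children.length x → pvNorm children.length x ∈ pvReach children root →
      ∀ D : Finset Nat,
        ((pvPraw children x).reverse).foldl (pvStep children) (pvMk children D)
          = pvMk children (D ∪ insert (pvNorm children.length x)
              (pvDesc children (pvNorm children.length x))) := by
    intro M
    induction M with
    | zero => intro x h; omega
    | succ M ih =>
      intro x hxM hxv hxr D
      rw [pvPraw_unfold children root hacyc hval x hxv hxr, List.reverse_cons,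
        List.foldl_append]
      have hrev : (((pvKids children x).reverse.flatMap (pvPraw children))).reverse
          = (pvKids children x).flatMap (fun c => (pvPraw children c).reverse) := by
        rw [List.reverse_flatMap, List.reverse_reverse]
        rfl
      rw [hrev]
      have blocks : ∀ cs : List Int, (∀ c ∈ cs, c ∈ pvKids children x) → ∀ D' : Finset Nat,
          List.foldl (pvStep children) (pvMk children D')
              (cs.flatMap (fun c => (pvPraw children c).reverse))
            = pvMk children (D' ∪ (cs.map (pvNorm children.length)).toFinset.biUnion
                (fun u => insert u (pvDesc children u))) := by
        intro cs
        induction cs with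
        | nil => intro _ D'; simp
        | cons c cs ihc =>
          intro hmem D'
          rw [List.flatMap_cons, List.foldl_append]
          have hcK : c ∈ children.getD (pvNorm children.length x) [] := by
            rw [← pvKids_eq children x hxv]; exact hmem c (List.mem_cons_self)
          have hcv : pvValidI children.length c := hval _ hxr c hcK
          have hcnb : pvNorm children.length c ∈ pvNbrs children (pvNorm children.length x) :=
            List.mem_map.2 ⟨c, hcK, rfl⟩
          have hcr := pvReach_closed children root _ hxr _ hcnb
          have hcM := pvM_lt children root hacyc _ _ hxr hcnb
          rw [ih c (by omega) hcv hcr D']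
          rw [ihc (fun a ha => hmem a (List.mem_cons_of_mem _ ha)) _]
          congr 1
          ext u
          simp only [Finset.mem_union, Finset.mem_biUnion, List.mem_toFinset, List.map_cons,
            List.mem_cons, Finset.mem_insert]
          constructor
          · rintro ((h | h | h) | ⟨a, ha, hu⟩)
            · exact Or.inl h
            · exact Or.inr ⟨pvNorm children.length c, Or.inl rfl, Or.inl h⟩
            · exact Or.inr ⟨pvNorm children.length c, Or.inl rfl, Or.inr h⟩
            · exact Or.inr ⟨a, Or.inr ha, hu⟩
          · rintro (h | ⟨a, rfl | ha, hu⟩)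
            · exact Or.inl (Or.inl h)
            · rcases hu with h | h
              · exact Or.inl (Or.inr (Or.inl h))
              · exact Or.inl (Or.inr (Or.inr h))
            · exact Or.inr ⟨a, ha, hu⟩
      rw [blocks (pvKids children x) (fun c h => h) D]
      simp only [List.foldl_cons, List.foldl_nil]
      have hkD : ∀ c ∈ children.getD (pvNorm children.length x) [],
          pvNorm children.length c ∈ D ∪ ((pvKids children x).map
            (pvNorm children.length)).toFinset.biUnion (fun u => insert u (pvDesc children u)) := by
        intro c hc
        refine Finset.mem_union_right _ (Finset.mem_biUnion.2
          ⟨pvNorm children.length c, ?_, Finset.mem_insert_self _ _⟩)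
        rw [List.mem_toFinset, pvKids_eq children x hxv]
        exact List.mem_map.2 ⟨c, hc, rfl⟩
      rw [pvStep_mk children root _ hacyc hval x hxv hxr hkD]
      congr 1
      have hnbrs_eq : ((pvKids children x).map (pvNorm children.length)).toFinset
          = (pvNbrs children (pvNorm children.length x)).toFinset := by
        rw [pvKids_eq children x hxv]; rfl
      rw [hnbrs_eq]
      exact pvInsertU children D (pvNorm children.length x)
  exact fun x hx hxr D => key (pvM children (pvNorm children.length x) + 1) x (by omega) hx hxr D

-- ---- assembling both sides ----
theorem pvA_main (children : List (List Int)) (root : Int)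
    (hroot : pvValidI children.length root)
    (hval : ∀ v ∈ pvReach children root, ∀ c ∈ children.getD v [], pvValidI children.length c)
    (hacyc : ∀ v ∈ pvReach children root, v ∉ pvDesc children v)
    (hne : pvKids children root ≠ []) :
    tree_sizes_from_children children root = pvMk children (pvReach children root) := by
  have hn0 : children ≠ [] := by
    intro h
    rcases hroot with ⟨h1, h2⟩
    rw [h] at h1 h2
    simp at h1 h2
    omega
  unfold tree_sizes_from_children
  rw [if_neg hn0, if_neg hne, pvMk_empty children]
  have hkeq := pvKids_eq children root hroot
  have hrm := pvRoot_mem_reach children root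
  have hcs : ∀ c ∈ pvKids children root, pvValidI children.length c ∧
      pvNorm children.length c ∈ pvReach children root := by
    intro c hc
    rw [hkeq] at hc
    exact ⟨hval _ hrm c hc, pvReach_closed children root _ hrm _ (List.mem_map.2 ⟨c, hc, rfl⟩)⟩
  have hnbrs_eq : ((pvKids children root).map (pvNorm children.length)).toFinset
      = (pvNbrs children (pvNorm children.length root)).toFinset := by
    rw [hkeq]; rfl
  have hsok : pvSOK children root
      (((pvKids children root).map (fun ch => (ch, true))).reverse ++ [(root, false)]) ∅ := by
    refine pvSOK_trueRev children root _ hcs _ _ ?_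
    rw [pvFinD_trueRev]
    refine ⟨hroot, hrm, ?_, trivial⟩
    intro c hc
    refine Finset.mem_union_right _ (Finset.mem_biUnion.2
      ⟨pvNorm children.length c, ?_, Finset.mem_insert_self _ _⟩)
    rw [List.mem_toFinset, hkeq]
    exact List.mem_map.2 ⟨c, hc, rfl⟩
  have hlk : (pvKids children root).length ≤ children.flatten.length := by
    rw [hkeq]; exact pvKids_len_le children _
  have hbound : ((pvKids children root).map
      (fun c => (pvPre children (pvNorm children.length c)).length)).sum
      ≤ (children.flatten.length + 1) ^ (2 * children.flatten.length + 4) := by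
    have hb : ∀ y ∈ (pvKids children root).map
        (fun c => (pvPre children (pvNorm children.length c)).length),
        y ≤ (children.flatten.length + 1) ^ (2 * children.flatten.length + 1) := by
      intro y hy
      rcases List.mem_map.1 hy with ⟨c, hc, rfl⟩
      exact pvPre_len_bnd children root hacyc _ (hcs c hc).2
    have hs := List.sum_le_card_nsmul _ _ hb
    rw [smul_eq_mul, List.length_map] at hs
    calc ((pvKids children root).map
          (fun c => (pvPre children (pvNorm children.length c)).length)).sum
        ≤ (pvKids children root).length
            * (children.flatten.length + 1) ^ (2 * children.flatten.length + 1) := hs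
      _ ≤ children.flatten.length
            * (children.flatten.length + 1) ^ (2 * children.flatten.length + 1) :=
          Nat.mul_le_mul_right _ hlk
      _ ≤ (children.flatten.length + 1)
            * (children.flatten.length + 1) ^ (2 * children.flatten.length + 1) :=
          Nat.mul_le_mul_right _ (by omega)
      _ = (children.flatten.length + 1) ^ (2 * children.flatten.length + 2) := by
          rw [← pow_succ']
      _ ≤ (children.flatten.length + 1) ^ (2 * children.flatten.length + 4) :=
          Nat.pow_le_pow_right (by omega) (by omega)
  have hcost : pvCost children
      (((pvKids children root).map (fun ch => (ch, true))).reverse ++ [(root, false)])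
      ≤ 2 * (children.flatten.length + 1) ^ (2 * children.flatten.length + 4) + 2 := by
    rw [pvCost_append, pvCost_trueRev]
    simp only [pvCost]
    omega
  rw [pvLoopA_run children root hacyc hval _ _ ∅ hsok hcost]
  congr 1
  rw [pvFinD_append, pvFinD_trueRev]
  simp only [pvFinD]
  rw [hnbrs_eq, pvInsertU children ∅ (pvNorm children.length root), Finset.empty_union]
  exact (pvReach_eq children root).symm

theorem pvB_main (children : List (List Int)) (root : Int)
    (hroot : pvValidI children.length root)
    (hval : ∀ v ∈ pvReach children root, ∀ c ∈ children.getD v [], pvValidI children.length c)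
    (hacyc : ∀ v ∈ pvReach children root, v ∉ pvDesc children v)
    (hne : pvKids children root ≠ []) :
    tree_sizes_from_children_alt children root = pvMk children (pvReach children root) := by
  have hn0 : children ≠ [] := by
    intro h
    rcases hroot with ⟨h1, h2⟩
    rw [h] at h1 h2
    simp at h1 h2
    omega
  unfold tree_sizes_from_children_alt
  rw [if_neg hn0, if_neg hne, pvMk_empty children]
  have hrm := pvRoot_mem_reach children root
  have hst : ∀ y ∈ [root], pvValidI children.length y ∧
      pvNorm children.length y ∈ pvReach children root := by
    intro y hy
    rw [List.mem_singleton] at hy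
    rw [hy]
    exact ⟨hroot, hrm⟩
  have hlen : (pvPraw children root).length
      = (pvPre children (pvNorm children.length root)).length := by
    rw [← pvPraw_map_norm children root hacyc hval root hroot hrm, List.length_map]
  have hsum : (([root]).map (fun y => (pvPraw children y).length)).sum
      ≤ (children.flatten.length + 1) ^ (2 * children.flatten.length + 4) + 1 := by
    simp only [List.map_cons, List.map_nil, List.sum_cons, List.sum_nil]
    have hb := pvPre_len_bnd children root hacyc _ hrm
    have hpow : (children.flatten.length + 1) ^ (2 * children.flatten.length + 1)
        ≤ (children.flatten.length + 1) ^ (2 * children.flatten.length + 4) :=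
      Nat.pow_le_pow_right (by omega) (by omega)
    omega
  rw [pvLoopOrder_run children root hacyc hval _ [root] [] hst hsum]
  simp only [List.nil_append, List.flatMap_cons, List.flatMap_nil, List.append_nil]
  rw [pvSweep_run children root hacyc hval root hroot hrm ∅, Finset.empty_union]
  exact congrArg _ (pvReach_eq children root).symm

-- ===== VERDICT (by name: the statement is the Claim_ definition above) =====
theorem tree_sizes_from_children_spec : Claim_equal_tree_sizes_from_children := by
  intro children root _hdom hpre
  unfold Spec_tree_sizes_from_children
  rcases hpre with hnil | ⟨hroot, _hone, hval, hacyc⟩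
  · subst hnil; rfl
  · by_cases hk : pvKids children root = []
    · have hne : children ≠ [] := by
        intro h; subst h
        rcases hroot with ⟨h1, h2⟩; simp at h1 h2; omega
      simp only [tree_sizes_from_children, tree_sizes_from_children_alt, if_neg hne, if_pos hk]
    · rw [pvA_main children root hroot hval hacyc hk, pvB_main children root hroot hval hacyc hk]
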